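-- pv_equiv track=rewrite | github.com/yamakatsunamamugi/aiauto | src/utils/column_utils.py | column_number_to_letter
-- ===== SOURCE A (Python) =====
-- def column_number_to_letter(column_number: int) -> str:
--     """
--     列番号を列記号に変換（1=A, 2=B, ...）
--
--     Args:
--         column_number: 列番号（1ベース）
--
--     Returns:
--         str: 列記号
--
--     Examples:
--         >>> column_number_to_letter(1)
--         'A'
--         >>> column_number_to_letter(26)
--         'Z'
--         >>> column_number_to_letter(27)
--         'AA'
--     """
--     if column_number < 1:
--         raise ValueError(f"列番号は1以上である必要があります: {column_number}")
--
--     result = ""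
--     while column_number > 0:
--         column_number -= 1
--         result = chr(column_number % 26 + ord('A')) + result
--         column_number //= 26
--     return result
-- ===== SOURCE B (Python) =====
-- def column_number_to_letter(column_number: int) -> str:
--     if column_number < 1:
--         raise ValueError(f"列番号は1以上である必要があります: {column_number}")
--     # Find the result length k and the smallest column number of that length.
--     k, start, block = 1, 1, 26
--     while column_number >= start + block:
--         k += 1
--         start += block
--         block *= 26
--     # Write column_number - start as a fixed-width k-digit base-26 numeral.
--     offset = column_number - start
--     chars = []
--     for _ in range(k):
--         chars.append(chr(offset % 26 + ord('A')))
--         offset //= 26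
--     return ''.join(reversed(chars))
-- ===== Notes on version B (the rewrite author's own statement) =====
-- stated objective: alternative
-- what changed: Instead of A's decrement-then-divmod loop that prepends characters, B first finds the output length k and the smallest column number of that length, then writes the offset as a fixed-width k-digit base-26 numeral (least-significant digit first) and reverses it.
import Mathlib
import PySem

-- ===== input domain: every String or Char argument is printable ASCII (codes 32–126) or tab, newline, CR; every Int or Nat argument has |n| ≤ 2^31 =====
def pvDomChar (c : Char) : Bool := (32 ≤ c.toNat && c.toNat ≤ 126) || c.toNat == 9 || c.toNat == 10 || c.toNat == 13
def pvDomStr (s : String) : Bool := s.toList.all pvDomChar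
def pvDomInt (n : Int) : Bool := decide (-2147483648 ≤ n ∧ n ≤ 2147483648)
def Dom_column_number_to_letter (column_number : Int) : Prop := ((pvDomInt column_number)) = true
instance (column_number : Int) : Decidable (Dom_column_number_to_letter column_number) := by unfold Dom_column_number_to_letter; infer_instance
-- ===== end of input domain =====

-- B differs: it first finds the output length k and the smallest column number of that
-- length, then emits a fixed-width k-digit base-26 numeral (LSB first) and reverses it,
-- instead of A's decrement/divmod loop prepending characters (objective: alternative).

-- ===== PORT A =====
-- A's while loop: `column_number -= 1; result = chr(column_number % 26 + 'A') + result;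
-- column_number //= 26`.  On n ≥ 1 Python's `//` and `%` agree with Nat division, so the
-- loop state is kept as a Nat; the string is carried as its character list.
def pvLoopA : Nat → List Char → List Char
  | n, result =>
    if h : n = 0 then result
    else pvLoopA ((n - 1) / 26) (Char.ofNat ((n - 1) % 26 + 65) :: result)
  termination_by n _ => n
  decreasing_by omega

def column_number_to_letter (column_number : Int) : String :=
  if column_number < 1 then ""   -- Python raises ValueError here; excluded by Pre_
  else String.ofList (pvLoopA column_number.toNat [])

-- ===== PORT B =====
-- Source B's first loop: `while column_number >= start + block: k += 1; start += block;
-- block *= 26`; returns the final (k, start).  The `block = 0` branch is a totality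
-- guard only: block starts at 26 and only grows, so it is never taken on the call below.
def pvFindLen (n : Nat) : Nat → Nat → Nat → Nat × Nat
  | k, start, block =>
    if _h : block = 0 then (k, start)
    else if start + block ≤ n then pvFindLen n (k + 1) (start + block) (block * 26)
    else (k, start)
  termination_by _ start _ => n + 1 - start

-- Source B's second loop: `for _ in range(k): chars.append(chr(offset % 26 + ord('A'))); offset //= 26`.
def pvDigits : Nat → Nat → List Char
  | 0, _ => []
  | k + 1, offset => Char.ofNat (offset % 26 + 65) :: pvDigits k (offset / 26)

def column_number_to_letter_alt (column_number : Int) : String :=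
  if column_number < 1 then ""   -- Source B raises ValueError here; excluded by Pre_
  else
    let p := pvFindLen column_number.toNat 1 1 26
    String.ofList ((pvDigits p.1 (column_number.toNat - p.2)).reverse)

-- ===== PRECONDITION & SPEC =====
-- Pre_: both programs raise ValueError when column_number < 1.
def Pre_column_number_to_letter (column_number : Int) : Prop := 1 ≤ column_number
instance (column_number : Int) : Decidable (Pre_column_number_to_letter column_number) := by unfold Pre_column_number_to_letter; infer_instance
def pvWitness_column_number_to_letter : Int := (28)

def Spec_column_number_to_letter (column_number : Int) (out : String) : Prop := out = column_number_to_letter_alt column_number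
instance (column_number : Int) (out : String) : Decidable (Spec_column_number_to_letter column_number out) := by unfold Spec_column_number_to_letter; infer_instance

-- ===== CLAIM (what is proved, stated in full; the proofs are below) =====
def Claim_equal_column_number_to_letter : Prop := ∀ (column_number : Int), Dom_column_number_to_letter column_number → Pre_column_number_to_letter column_number → Spec_column_number_to_letter column_number (column_number_to_letter column_number)

-- ===== LEMMAS AND PROOFS =====

-- Ghost recursive characterization of the bijective base-26 numeral (proof-side only).
def pvLetters : Nat → List Char
  | n =>
    if _h : n = 0 then []
    else pvLetters ((n - 1) / 26) ++ [Char.ofNat ((n - 1) % 26 + 65)]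
  decreasing_by omega

-- Smallest column number whose numeral has length k (sVal 0 = 0 as a sentinel).
def sVal : Nat → Nat
  | 0 => 0
  | k + 1 => 26 * sVal k + 1

theorem pvLoopA_eq_letters (n : Nat) : ∀ acc, pvLoopA n acc = pvLetters n ++ acc := by
  induction n using Nat.strong_induction_on with
  | _ n ih =>
    intro acc
    rw [pvLoopA.eq_def, pvLetters.eq_def]
    by_cases h : n = 0
    · simp [h]
    · simp only [dif_neg h]
      rw [ih ((n - 1) / 26) (by omega)]
      simp

theorem letters_eq_digits : ∀ k offset, offset < 26 ^ k →
    pvLetters (sVal k + offset) = (pvDigits k offset).reverse := by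
  intro k
  induction k with
  | zero =>
    intro offset h
    interval_cases offset
    simp [sVal, pvLetters, pvDigits]
  | succ k ih =>
    intro offset h
    have hn : sVal (k + 1) + offset ≠ 0 := by simp [sVal]
    rw [pvLetters.eq_def]
    simp only [dif_neg hn]
    have h1 : sVal (k + 1) + offset - 1 = 26 * sVal k + offset := by simp [sVal]
    have h2 : (26 * sVal k + offset) / 26 = sVal k + offset / 26 := by omega
    have h3 : (26 * sVal k + offset) % 26 = offset % 26 := by omega
    rw [h1, h2, h3, ih (offset / 26) (by
      have : 26 ^ (k + 1) = 26 * 26 ^ k := by ring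
      omega)]
    simp [pvDigits]

theorem sVal_closed : ∀ k, 25 * sVal k + 1 = 26 ^ k := by
  intro k
  induction k with
  | zero => simp [sVal]
  | succ k ih => simp [sVal, pow_succ]; omega

theorem findLen_spec_aux (n : Nat) : ∀ m start k block, n + 1 - start ≤ m →
    start = sVal k → block = 26 ^ k →
    start ≤ n → ∃ k', pvFindLen n k start block = (k', sVal k') ∧
      sVal k' ≤ n ∧ n < sVal k' + 26 ^ k' := by
  intro m
  induction m with
  | zero => intro start k block hm; omega
  | succ m ih =>
    intro start k block hm hs hb hle
    rw [pvFindLen.eq_def]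
    have hbpos : block ≠ 0 := by
      rw [hb]; positivity
    simp only [dif_neg hbpos]
    by_cases hcont : start + block ≤ n
    · simp only [if_pos hcont]
      have hbp : 1 ≤ block := by omega
      exact ih (start + block) (k + 1) (block * 26) (by omega)
        (by have := sVal_closed k; simp [sVal, hs, hb]; omega)
        (by rw [hb]; ring) hcont
    · simp only [if_neg hcont]
      exact ⟨k, by rw [hs], by omega, by omega⟩

-- ===== VERDICT (by name: the statement is the Claim_ definition above) =====
theorem column_number_to_letter_spec : Claim_equal_column_number_to_letter := by
  intro n _ hpre
  unfold Spec_column_number_to_letter column_number_to_letter column_number_to_letter_alt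
  have h : ¬ n < 1 := by exact not_lt.mpr hpre
  simp only [if_neg h]
  have hn1 : 1 ≤ n.toNat := by omega
  obtain ⟨k', heq, hle, hlt⟩ := findLen_spec_aux n.toNat (n.toNat + 1) 1 1 26 (by omega) rfl (by norm_num) hn1
  rw [pvLoopA_eq_letters, List.append_nil, heq]
  simp only
  have : n.toNat = sVal k' + (n.toNat - sVal k') := by omega
  rw [this, letters_eq_digits k' (n.toNat - sVal k') (by omega)]
  simp
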